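-- pv_equiv track=rewrite | github.com/kali-Gaurav/StartupRouteMaster | backend/route_service/raptor.py | _get_stations_on_trip
-- ===== SOURCE A (Python) =====
-- def _get_stations_on_trip(trip, from_station):
--     """Get all stations reachable from from_station on this trip"""
--     stations = []
--     found = False
--     for stop in trip['stops']:
--         if stop['station'] == from_station:
--             found = True
--         elif found:
--             stations.append(stop['station'])
--     return stations
-- ===== SOURCE B (Python) =====
-- def _get_stations_on_trip(trip, from_station):
--     """Get all stations reachable from from_station on this trip"""
--     names = [stop['station'] for stop in trip['stops']]
--     return [n for i, n in enumerate(names)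
--             if n != from_station and from_station in names[:i]]
-- ===== Notes on version B (the rewrite author's own statement) =====
-- stated objective: alternative
-- what changed: Replaces A's stateful single pass with a 'found' flag by a stateless per-element criterion: a name is emitted iff it differs from from_station and from_station occurs somewhere in the strict prefix of names before it (a nested prefix-membership scan, no flag and no marker search).
import Mathlib
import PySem

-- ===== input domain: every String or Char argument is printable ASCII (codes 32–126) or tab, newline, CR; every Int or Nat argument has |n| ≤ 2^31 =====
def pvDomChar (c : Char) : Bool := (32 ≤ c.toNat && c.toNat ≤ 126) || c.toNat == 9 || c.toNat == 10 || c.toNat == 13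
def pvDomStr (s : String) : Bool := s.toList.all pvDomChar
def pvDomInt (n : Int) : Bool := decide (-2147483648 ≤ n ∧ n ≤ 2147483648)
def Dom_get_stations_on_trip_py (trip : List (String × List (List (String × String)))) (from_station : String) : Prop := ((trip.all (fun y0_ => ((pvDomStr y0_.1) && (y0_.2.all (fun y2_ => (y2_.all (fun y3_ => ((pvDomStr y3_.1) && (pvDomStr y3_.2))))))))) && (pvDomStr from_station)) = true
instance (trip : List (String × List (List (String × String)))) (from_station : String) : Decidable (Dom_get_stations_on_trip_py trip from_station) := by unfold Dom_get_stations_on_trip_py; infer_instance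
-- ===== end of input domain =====

-- B drops A's stateful 'found' flag for a stateless per-element criterion: a name is
-- emitted iff it differs from from_station and from_station occurs in the strict
-- prefix of names before it (a nested prefix-membership scan; alternative, not faster).

-- ===== PORT A =====
-- loop with a 'found' flag: state = (stations accumulated so far, found)
def get_stations_on_trip_py (trip : List (String × List (List (String × String)))) (from_station : String) : List String :=
  let stops := (PySem.Dict.mk trip).getD "stops" []
  (stops.foldl
    (fun (st : List String × Bool) stop =>
      let name := (PySem.Dict.mk stop).getD "station" ""
      if name == from_station then (st.1, true)
      else if st.2 then (st.1 ++ [name], st.2) else st)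
    ([], false)).1

-- ===== PORT B =====
-- names list; keep n at index i iff n != from_station and from_station ∈ names[:i]
def get_stations_on_trip_py_alt (trip : List (String × List (List (String × String)))) (from_station : String) : List String :=
  let names := ((PySem.Dict.mk trip).getD "stops" []).map
    (fun stop => (PySem.Dict.mk stop).getD "station" "")
  ((PySem.List.enumerate names 0).filter
      (fun p => p.2 != from_station && (PySem.List.slice names none (some p.1)).contains from_station)).map
    (fun p => p.2)

-- ===== PRECONDITION & SPEC =====
-- Pre_ excludes exactly the inputs where Python A raises KeyError: a trip without a
-- "stops" key, or a stop without a "station" key.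
def Pre_get_stations_on_trip_py (trip : List (String × List (List (String × String)))) (from_station : String) : Prop :=
  ((PySem.Dict.mk trip).get? "stops").isSome = true ∧
  ∀ stop ∈ (PySem.Dict.mk trip).getD "stops" [], ((PySem.Dict.mk stop).get? "station").isSome = true
instance (trip : List (String × List (List (String × String)))) (from_station : String) : Decidable (Pre_get_stations_on_trip_py trip from_station) := by unfold Pre_get_stations_on_trip_py; infer_instance

def pvWitness_get_stations_on_trip_py : (List (String × List (List (String × String)))) × String :=
  ([("stops", [[("station", "a")], [("station", "b")], [("station", "c")]])], "a")

def Spec_get_stations_on_trip_py (trip : List (String × List (List (String × String)))) (from_station : String) (out : List String) : Prop := out = get_stations_on_trip_py_alt trip from_station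
instance (trip : List (String × List (List (String × String)))) (from_station : String) (out : List String) : Decidable (Spec_get_stations_on_trip_py trip from_station out) := by unfold Spec_get_stations_on_trip_py; infer_instance

-- ===== CLAIM (what is proved, stated in full; the proofs are below) =====
def Claim_equal_get_stations_on_trip_py : Prop := ∀ (trip : List (String × List (List (String × String)))) (from_station : String), Dom_get_stations_on_trip_py trip from_station → Pre_get_stations_on_trip_py trip from_station → Spec_get_stations_on_trip_py trip from_station (get_stations_on_trip_py trip from_station)

-- ===== LEMMAS AND PROOFS =====

-- A side: once found = true, the loop appends every later non-matching name
theorem foldl_found {α : Type} (f : String) (nameOf : α → String) : ∀ (l : List α) (acc : List String),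
    (l.foldl
      (fun (st : List String × Bool) stop =>
        if nameOf stop == f then (st.1, true)
        else if st.2 then (st.1 ++ [nameOf stop], st.2) else st)
      (acc, true)).1 = acc ++ (l.map nameOf).filter (fun s => s != f) := by
  intro l
  induction l with
  | nil => intro acc; simp
  | cons n l ih =>
    intro acc
    simp only [List.foldl_cons, List.map_cons, List.filter_cons]
    by_cases h : (nameOf n == f) = true
    · have hb : (nameOf n != f) = false := by simp [bne, h]
      simp only [h, if_true, hb]
      exact ih acc
    · have hb : (nameOf n != f) = true := by simp [bne, h]
      simp only [h, if_false, hb, Bool.false_eq_true, if_pos trivial]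
      rw [ih (acc ++ [nameOf n])]
      simp

-- A side: with found = false and empty accumulator, the loop equals a canonical
-- dropWhile/drop/filter form
theorem foldl_main {α : Type} (f : String) (nameOf : α → String) : ∀ (l : List α),
    (l.foldl
      (fun (st : List String × Bool) stop =>
        if nameOf stop == f then (st.1, true)
        else if st.2 then (st.1 ++ [nameOf stop], st.2) else st)
      ([], false)).1
      = (((l.map nameOf).dropWhile (fun s => s != f)).drop 1).filter (fun s => s != f) := by
  intro l
  induction l with
  | nil => simp
  | cons n l ih =>
    by_cases h : nameOf n == f
    · have hd : (nameOf n != f) = false := by simp [bne, h]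
      simp only [List.foldl, List.map_cons, h, if_true, List.dropWhile, hd]
      simpa using foldl_found f nameOf l []
    · have hd : (nameOf n != f) = true := by simp [bne, h]
      simp only [List.foldl, List.map_cons, h, Bool.false_eq_true, if_false, List.dropWhile, hd]
      exact ih

-- B side: the prefix-membership filter equals the same canonical form.
-- Generalised over the processed prefix 'pre' (names = pre ++ l).
theorem filter_prefix_main (f : String) (names : List String) : ∀ (l pre : List String),
    names = pre ++ l →
    ((PySem.List.enumerate l (pre.length : Int)).filter
        (fun p => p.2 != f && (PySem.List.slice names none (some p.1)).contains f)).map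
      (fun p => p.2)
    = if pre.contains f then l.filter (fun s => s != f)
      else ((l.dropWhile (fun s => s != f)).drop 1).filter (fun s => s != f) := by
  intro l
  induction l with
  | nil =>
    intro pre _
    simp [PySem.List.enumerate]
  | cons n l ih =>
    intro pre hnames
    have hslice : PySem.List.slice names none (some (pre.length : Int)) = pre := by
      rw [PySem.List.slice_to_natCast, hnames]
      simp
    have htail := ih (pre ++ [n]) (by simp [hnames])
    rw [PySem.List.enumerate_cons, List.filter_cons]
    have hstart : (pre.length : Int) + 1 = ((pre ++ [n]).length : Int) := by simp
    by_cases hpre : pre.contains f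
    · have hmem : f ∈ pre := by simpa using hpre
      by_cases h : (n == f) = true
      · have hb : (n != f) = false := by simp [bne, h]
        simp only [hb, Bool.false_and, Bool.false_eq_true, if_neg (by simp : ¬ False)]
        rw [hstart, htail]
        have hpn : (pre ++ [n]).contains f = true := by simp [hmem]
        rw [if_pos hpn, if_pos hpre]
        simp [hb]
      · have hb : (n != f) = true := by simp [bne, h]
        simp only [hb, Bool.true_and, hslice, hpre, if_pos trivial, List.map_cons]
        rw [hstart, htail]
        have hpn : (pre ++ [n]).contains f = true := by simp [hmem]
        rw [if_pos hpn]
        simp [hb]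
    · have hpre' : pre.contains f = false := by simpa using hpre
      simp only [hslice, hpre', Bool.and_false, Bool.false_eq_true, if_neg (by simp : ¬ False)]
      rw [hstart, htail]
      by_cases h : (n == f) = true
      · have hb : (n != f) = false := by simp [bne, h]
        have hnf : n = f := by simpa using h
        have hpn : (pre ++ [n]).contains f = true := by simp [hnf]
        rw [if_pos hpn]
        simp [List.dropWhile, hb]
      · have hb : (n != f) = true := by simp [bne, h]
        have hnm : ¬ f ∈ pre := by simpa using hpre'
        have hfn : ¬ f = n := fun e => h (by simp [e])
        rw [if_neg (by simp; exact ⟨hnm, hfn⟩)]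
        simp [List.dropWhile, hb]

-- ===== VERDICT (by name: the statement is the Claim_ definition above) =====
theorem get_stations_on_trip_py_spec : Claim_equal_get_stations_on_trip_py := by
  intro trip from_station _ _
  unfold Spec_get_stations_on_trip_py
  simp only [get_stations_on_trip_py, get_stations_on_trip_py_alt]
  rw [foldl_main from_station (fun stop => (PySem.Dict.mk stop).getD "station" "") _]
  have h := filter_prefix_main from_station
    (((PySem.Dict.mk trip).getD "stops" []).map (fun stop => (PySem.Dict.mk stop).getD "station" ""))
    (((PySem.Dict.mk trip).getD "stops" []).map (fun stop => (PySem.Dict.mk stop).getD "station" ""))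
    [] (by simp)
  simp only [List.length_nil, Nat.cast_zero, List.contains_nil, Bool.false_eq_true,
    if_neg (by simp : ¬ False)] at h
  exact h.symm
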